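-- pv_equiv track=rewrite | github.com/Danelc/XyBot | Functions/Roulette.py | count_unique_strings
-- ===== SOURCE A (Python) =====
-- def count_unique_strings(input_list):
--     """
--     Count the frequency of unique strings in a list.
--
--     Args:
--         input_list (list): List of strings to analyze
--
--     Returns:
--         tuple: (unique_strings, frequencies) where:
--             - unique_strings is a list of unique strings
--             - frequencies is a list of corresponding counts
--     """
--     # Create a dictionary to store counts
--     count_dict = {}
--
--     # Count occurrences of each string
--     for item in input_list:
--         if item in count_dict:
--             count_dict[item] += 1
--         else:
--             count_dict[item] = 1
--
--     # Create separate lists for strings and their counts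
--     unique_strings = list(count_dict.keys())
--     frequencies = [count_dict[s] for s in unique_strings]
--     return unique_strings, frequencies
-- ===== SOURCE B (Python) =====
-- def count_unique_strings(input_list):
--     unique_strings = []
--     frequencies = []
--     rest = input_list
--     while rest:
--         head = rest[0]
--         unique_strings.append(head)
--         frequencies.append(rest.count(head))
--         rest = [x for x in rest if x != head]
--     return unique_strings, frequencies
-- ===== Notes on version B (the rewrite author's own statement) =====
-- stated objective: alternative
-- what changed: Replaces the dict tally with a shrinking-worklist loop: repeatedly take the first remaining string, count its occurrences in the remaining worklist, and filter out all its copies, so no dictionary, no membership test and no rescans of the full input are used.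
import Mathlib
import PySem

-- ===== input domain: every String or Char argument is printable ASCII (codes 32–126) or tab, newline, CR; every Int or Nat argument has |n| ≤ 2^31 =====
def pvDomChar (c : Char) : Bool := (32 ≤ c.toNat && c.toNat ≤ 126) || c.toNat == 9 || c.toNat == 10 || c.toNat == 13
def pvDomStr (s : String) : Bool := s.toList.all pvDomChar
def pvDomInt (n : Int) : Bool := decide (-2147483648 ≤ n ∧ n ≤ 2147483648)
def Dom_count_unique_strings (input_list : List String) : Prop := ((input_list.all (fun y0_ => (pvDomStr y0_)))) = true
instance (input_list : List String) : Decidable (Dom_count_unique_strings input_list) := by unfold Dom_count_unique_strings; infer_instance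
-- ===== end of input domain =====

-- B replaces A's dict tally with a shrinking-worklist loop (take first string, count it in the worklist, filter it out); alternative decomposition, not faster.

-- ===== PORT A =====
def count_unique_strings (input_list : List String) : List String × List Int :=
  let count_dict := input_list.foldl (fun d item =>
    if d.contains item then d.insert item (d.getD item 0 + 1)
    else d.insert item 1) (PySem.Dict.empty : PySem.Dict String Int)
  let unique_strings := count_dict.keys
  let frequencies := unique_strings.map (fun s => count_dict.getD s 0)
  (unique_strings, frequencies)

-- ===== PORT B =====
-- the while loop over the shrinking worklist `rest`, as structural recursion on the worklist
def csuWhile : List String → List String × List Int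
  | [] => ([], [])
  | head :: t =>
    let cnt : Int := PySem.List.count (head :: t) head
    let rest := (head :: t).filter (fun x => x ≠ head)
    let res := csuWhile rest
    (head :: res.1, cnt :: res.2)
termination_by l => l.length
decreasing_by
  rw [List.filter_cons_of_neg (by simp)]
  have := List.length_filter_le (fun x => decide (x ≠ head)) t
  simp only [List.length_cons]
  omega

def count_unique_strings_alt (input_list : List String) : List String × List Int :=
  csuWhile input_list

-- ===== PRECONDITION & SPEC =====
def Spec_count_unique_strings (input_list : List String) (out : List String × List Int) : Prop := out = count_unique_strings_alt input_list
instance (input_list : List String) (out : List String × List Int) : Decidable (Spec_count_unique_strings input_list out) := by unfold Spec_count_unique_strings; infer_instance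

-- ===== CLAIM (what is proved, stated in full; the proofs are below) =====
def Claim_equal_count_unique_strings : Prop := ∀ (input_list : List String), Dom_count_unique_strings input_list → Spec_count_unique_strings input_list (count_unique_strings input_list)

-- ===== LEMMAS AND PROOFS =====

-- A's tally loop is exactly the Counter fold once the else-branch's insert of 1 is seen as getD+1 on a missing key
theorem a_dict_eq_counter (l : List String) :
    l.foldl (fun d item =>
      if d.contains item then d.insert item (d.getD item 0 + 1)
      else d.insert item 1) (PySem.Dict.empty : PySem.Dict String Int)
    = PySem.Dict.counter l := by
  rw [← PySem.Dict.foldl_insert_getD_add_one_eq_counter]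
  apply PySem.List.foldl_congr_mem
  intro d x _
  by_cases h : d.contains x
  · simp [h]
  · have h' : d.contains x = false := by simpa using h
    simp [h, PySem.Dict.getD_of_not_contains]

-- adding an element already present leaves a Set unchanged; membership is preserved by add
theorem add_of_mem {s : List String} {x : String} (h : x ∈ s) : PySem.Set.add s x = s := by
  simp [PySem.Set.add, PySem.Set.contains, h]

theorem mem_add_of_mem {s : List String} {x y : String} (h : x ∈ s) : x ∈ PySem.Set.add s y := by
  simp [PySem.Set.mem_add, h]

-- filtering out an element already in the accumulator does not change the foldl-add result
theorem foldl_add_filter (h : String) :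
    ∀ (l acc : List String), h ∈ acc →
    List.foldl PySem.Set.add acc (l.filter (fun x => x ≠ h)) = List.foldl PySem.Set.add acc l := by
  intro l
  induction l with
  | nil => intro acc _; rfl
  | cons a t ih =>
    intro acc hmem
    by_cases hah : a = h
    · subst hah
      rw [List.filter_cons_of_neg (by simp), ih acc hmem, List.foldl_cons, add_of_mem hmem]
    · rw [List.filter_cons_of_pos (by simp [hah])]
      simp only [List.foldl_cons]
      exact ih _ (mem_add_of_mem hmem)

-- pushing a fresh head through foldl-add over a list avoiding it
theorem foldl_add_cons (h : String) :
    ∀ (l s : List String), h ∉ s → (∀ x ∈ l, x ≠ h) →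
    List.foldl PySem.Set.add (h :: s) l = h :: List.foldl PySem.Set.add s l := by
  intro l
  induction l with
  | nil => intro s _ _; rfl
  | cons a t ih =>
    intro s hns hall
    have hne : a ≠ h := hall a (by simp)
    have hstep : PySem.Set.add (h :: s) a = h :: PySem.Set.add s a := by
      by_cases hc : a ∈ s
      · simp [PySem.Set.add, PySem.Set.contains, hc, hne]
      · simp [PySem.Set.add, PySem.Set.contains, hc, hne]
    simp only [List.foldl_cons, hstep]
    refine ih _ ?_ ?_
    · simp [PySem.Set.mem_add, hns, Ne.symm hne]
    · intro x hx; exact hall x (by simp [hx])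

-- set(h::t) = h :: set(t with all copies of h removed)
theorem ofList_cons_filter (h : String) (t : List String) :
    PySem.Set.ofList (h :: t) = h :: PySem.Set.ofList (t.filter (fun x => x ≠ h)) := by
  have h1 : PySem.Set.ofList (h :: t) = List.foldl PySem.Set.add [h] t := rfl
  rw [h1, ← foldl_add_filter h t [h] (by simp),
      foldl_add_cons h (t.filter (fun x => x ≠ h)) [] (by simp)
        (by intro x hx; simpa using (List.of_mem_filter hx))]
  rfl

-- B's worklist loop computes the first-occurrence uniques paired with their counts
theorem csuWhile_eq : ∀ (l : List String),
    csuWhile l = (PySem.Set.ofList l, (PySem.Set.ofList l).map (fun s => (l.count s : Int)))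
  | [] => by simp [csuWhile]
  | h :: t => by
    have hrest : ((h :: t).filter (fun x => x ≠ h)) = t.filter (fun x => x ≠ h) := by
      simp
    have ih := csuWhile_eq (t.filter (fun x => x ≠ h))
    simp only [csuWhile, hrest, ih, ofList_cons_filter h t, List.map_cons]
    refine Prod.ext rfl ?_
    refine congrArg₂ _ ?_ ?_
    · simp [PySem.List.count_eq]
    · refine (List.map_congr_left ?_).symm
      intro s hs
      have hsne : s ≠ h := by
        have := List.of_mem_filter ((PySem.Set.mem_ofList _ _).mp hs)
        simpa using this
      simp [List.count_filter, hsne, hsne.symm]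
termination_by l => l.length
decreasing_by
  have := List.length_filter_le (fun x => decide (x ≠ h)) t
  simp only [List.length_cons]
  omega

-- ===== VERDICT (by name: the statement is the Claim_ definition above) =====
theorem count_unique_strings_spec : Claim_equal_count_unique_strings := by
  intro l _
  unfold Spec_count_unique_strings count_unique_strings count_unique_strings_alt
  rw [a_dict_eq_counter, csuWhile_eq]
  simp only [PySem.Dict.keys_counter, PySem.Dict.getD_counter]
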